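-- pv_equiv track=rewrite | github.com/tomcassi/IC-TPI | crear_secuencias.py | aplanar_secuencia
-- ===== SOURCE A (Python) =====
-- def aplanar_secuencia(x,y):
--     x_aplanado=[]
--     y_aplanado=[]
--
--     # Suponiendo que x tiene 3 listas y quieres recorrer sus elementos
--     for i in range(len(x[0])):  # Asumiendo que x[0], x[1], x[2] tienen la misma longitud
--         x_auxiliar = []  # Crear una lista vacía para almacenar los elementos en cada iteración
--
--
--         x_auxiliar.extend(x[0][i])  # Agregar todos los elementos de x[0][i] a x_auxiliar
--         # x_auxiliar.extend(x[1][i])  # Agregar todos los elementos de x[1][i] a x_auxiliar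
--         # x_auxiliar.extend(x[2][i])  # Agregar todos los elementos de x[2][i] a x_auxiliar
--
--         def aplanar(lista):
--             resultado = []
--             for elemento in lista:
--                 if isinstance(elemento, list):
--                     resultado.extend(aplanar(elemento))
--                 else:
--                     resultado.append(elemento)
--
--             return resultado
--
--         resultado=aplanar(x_auxiliar)
--
--         x_aplanado.append(resultado)  # Agregar los elementos de x_auxiliar a la lista final (esto aplana la lista)
--
--        ######
--
--         y_auxiliar = []  # Crear una lista vacía para almacenar los elementos en cada iteración
--
--
--         y_auxiliar.extend(y[0][i])  # Agregar todos los elementos de x[0][i] a x_auxiliar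
--         # y_auxiliar.extend(y[1][i])  # Agregar todos los elementos de x[1][i] a x_auxiliar
--         # y_auxiliar.append(y[2][i])  # Agregar todos los elementos de x[2][i] a x_auxiliar
--
--         resultado=aplanar(y_auxiliar)
--
--         y_aplanado.append(resultado)  # Agregar los elementos de x_auxiliar a la lista final (esto aplana la lista)
--
--     return x_aplanado,y_aplanado
-- ===== SOURCE B (Python) =====
-- def aplanar_secuencia(x, y):
--     # Iterative stack-based flatten instead of A's per-iteration recursive helper.
--     def aplanar(lista):
--         plano = []
--         stack = list(reversed(lista))
--         while stack:
--             e = stack.pop()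
--             if isinstance(e, list):
--                 stack.extend(reversed(e))
--             else:
--                 plano.append(e)
--         return plano
--
--     n = len(x[0])
--     x_aplanado = [aplanar(sub) for sub in x[0]]
--     y_aplanado = [aplanar(y[0][i]) for i in range(n)]
--     return x_aplanado, y_aplanado
-- ===== Notes on version B (the rewrite author's own statement) =====
-- stated objective: idiomatic
-- what changed: Replaces A's per-iteration recursive flatten with a single iterative stack-based flatten helper, and A's index loop with two list comprehensions (over x[0] and over indices of y[0]).
import Mathlib
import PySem

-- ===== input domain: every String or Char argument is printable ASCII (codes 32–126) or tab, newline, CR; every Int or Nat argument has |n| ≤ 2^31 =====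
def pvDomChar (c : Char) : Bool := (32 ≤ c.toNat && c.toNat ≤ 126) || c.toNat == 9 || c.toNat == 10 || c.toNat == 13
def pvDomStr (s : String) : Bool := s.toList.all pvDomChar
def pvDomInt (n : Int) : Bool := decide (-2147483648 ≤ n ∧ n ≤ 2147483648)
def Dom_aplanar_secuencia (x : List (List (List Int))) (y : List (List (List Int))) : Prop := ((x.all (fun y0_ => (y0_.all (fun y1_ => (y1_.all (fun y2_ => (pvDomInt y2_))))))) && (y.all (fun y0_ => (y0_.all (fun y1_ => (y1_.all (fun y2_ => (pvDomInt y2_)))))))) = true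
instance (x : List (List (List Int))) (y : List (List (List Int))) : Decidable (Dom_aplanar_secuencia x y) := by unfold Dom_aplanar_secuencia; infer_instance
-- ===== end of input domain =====

-- B flattens with an iterative stack and comprehensions instead of A's recursive helper inside an index loop; same values on Pre_ (idiomatic rewrite, no speed claim).

-- ===== PORT A =====
-- A's inner recursive 'aplanar': at this type every element of the list is an
-- Int, so the 'isinstance(elemento, list)' branch never fires; only the
-- append branch is ported.
def aplanarA (lista : List Int) : List Int :=
  lista.foldl (fun resultado elemento => resultado ++ [elemento]) []

def aplanar_secuencia (x : List (List (List Int))) (y : List (List (List Int))) : List (List Int) × List (List Int) :=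
  let x0 := PySem.List.pyGetD x 0 []   -- x[0]; in range under Pre_
  let y0 := PySem.List.pyGetD y 0 []   -- y[0]; only read when the loop runs, in range under Pre_
  (PySem.List.pyRange 0 (x0.length) 1).foldl
    (fun (acc : List (List Int) × List (List Int)) i =>
      let x_auxiliar := ([] : List Int) ++ PySem.List.pyGetD x0 i []
      let resx := aplanarA x_auxiliar
      let y_auxiliar := ([] : List Int) ++ PySem.List.pyGetD y0 i []
      let resy := aplanarA y_auxiliar
      (acc.1 ++ [resx], acc.2 ++ [resy]))
    ([], [])

-- ===== PORT B =====
-- B's iterative stack flatten: pop from the end of the stack; at this type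
-- every popped element is an Int, so it is appended to the output.
def flatIter (stack : List Int) (plano : List Int) : List Int :=
  if h : stack = [] then plano
  else flatIter stack.dropLast (plano ++ [stack.getLast h])
termination_by stack.length
decreasing_by
  have := List.length_pos_of_ne_nil h
  simp [List.length_dropLast]; omega

def aplanarB (lista : List Int) : List Int := flatIter lista.reverse []

def aplanar_secuencia_alt (x : List (List (List Int))) (y : List (List (List Int))) : List (List Int) × List (List Int) :=
  let x0 := PySem.List.pyGetD x 0 []   -- x[0]
  let n := x0.length
  (x0.map aplanarB,
   (PySem.List.pyRange 0 (n : Int) 1).map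
     (fun i => aplanarB (PySem.List.pyGetD (PySem.List.pyGetD y 0 []) i [])))   -- y[0][i], read per iteration

-- ===== PRECONDITION & SPEC =====
-- Pre_ excludes exactly the inputs on which A raises IndexError: x = [] (x[0]
-- fails), and x[0] nonempty while y = [] or y[0] shorter than x[0] (y[0][i]
-- fails inside the loop). A returns on every admitted input.
def Pre_aplanar_secuencia (x : List (List (List Int))) (y : List (List (List Int))) : Prop :=
  x ≠ [] ∧ ((x.headD []) = [] ∨ (y ≠ [] ∧ (x.headD []).length ≤ (y.headD []).length))
instance (x : List (List (List Int))) (y : List (List (List Int))) : Decidable (Pre_aplanar_secuencia x y) := by unfold Pre_aplanar_secuencia; infer_instance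

def pvWitness_aplanar_secuencia : List (List (List Int)) × List (List (List Int)) :=
  ([[[1, 2], [3]]], [[[5], [6, 7]]])

def Spec_aplanar_secuencia (x : List (List (List Int))) (y : List (List (List Int))) (out : List (List Int) × List (List Int)) : Prop := out = aplanar_secuencia_alt x y
instance (x : List (List (List Int))) (y : List (List (List Int))) (out : List (List Int) × List (List Int)) : Decidable (Spec_aplanar_secuencia x y out) := by unfold Spec_aplanar_secuencia; infer_instance

-- ===== CLAIM (what is proved, stated in full; the proofs are below) =====
def Claim_equal_aplanar_secuencia : Prop := ∀ (x : List (List (List Int))) (y : List (List (List Int))), Dom_aplanar_secuencia x y → Pre_aplanar_secuencia x y → Spec_aplanar_secuencia x y (aplanar_secuencia x y)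

-- ===== LEMMAS AND PROOFS =====

theorem flatIter_eq (stack plano : List Int) : flatIter stack plano = plano ++ stack.reverse := by
  by_cases h : stack = []
  · subst h; simp [flatIter]
  · rw [flatIter]
    simp only [dif_neg h]
    rw [flatIter_eq stack.dropLast (plano ++ [stack.getLast h])]
    conv_rhs => rw [← List.dropLast_append_getLast h]
    simp
termination_by stack.length
decreasing_by
  have := List.length_pos_of_ne_nil h
  simp [List.length_dropLast]; omega

theorem aplanarB_id (l : List Int) : aplanarB l = l := by
  simp [aplanarB, flatIter_eq]

theorem aplanarA_id (l : List Int) : aplanarA l = l := by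
  have := PySem.List.foldl_append_singleton_eq_map (f := fun e : Int => e) (acc := ([] : List Int)) (l := l)
  simpa [aplanarA] using this

theorem map_pyGetD_self (x0 : List (List Int)) :
    (PySem.List.pyRange 0 (x0.length : Int) 1).map (fun i => PySem.List.pyGetD x0 i []) = x0 := by
  suffices h : ∀ n, n ≤ x0.length →
      (PySem.List.pyRange 0 (n : Int) 1).map (fun i => PySem.List.pyGetD x0 i []) = x0.take n by
    simpa using h x0.length le_rfl
  intro n
  induction n with
  | zero => simp [PySem.List.pyRange_one_eq_nil]
  | succ k ih =>
      intro hle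
      have hk : (((k + 1 : Nat)) : Int) = (k : Int) + 1 := by push_cast; ring
      rw [hk, PySem.List.pyRange_one_succ_right (by positivity), List.map_append]
      rw [ih (by omega)]
      have hkl : k < x0.length := by omega
      have hget : PySem.List.pyGetD x0 (k : Int) [] = x0[k] := by
        rw [PySem.List.pyGetD_natCast]
        simp [List.getD_eq_getElem?_getD, List.getElem?_eq_getElem hkl]
      simp only [List.map_cons, List.map_nil, hget]
      rw [List.take_add_one, List.getElem?_eq_getElem hkl]
      simp

theorem aplanar_secuencia_spec : Claim_equal_aplanar_secuencia := by
  intro x y _ _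
  unfold Spec_aplanar_secuencia aplanar_secuencia aplanar_secuencia_alt
  simp only [aplanarA_id, List.nil_append]
  set x0 := PySem.List.pyGetD x 0 [] with hx0
  set y0 := PySem.List.pyGetD y 0 [] with hy0
  rw [PySem.List.foldl_prod_mk
        (f := fun (a : List (List Int)) (i : Int) => a ++ [PySem.List.pyGetD x0 i []])
        (g := fun (a : List (List Int)) (i : Int) => a ++ [PySem.List.pyGetD y0 i []])]
  rw [PySem.List.foldl_append_singleton_eq_map (f := fun i => PySem.List.pyGetD x0 i []),
      PySem.List.foldl_append_singleton_eq_map (f := fun i => PySem.List.pyGetD y0 i [])]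
  refine Prod.ext ?_ ?_
  · simp only
    rw [map_pyGetD_self x0]
    rw [List.map_congr_left (fun a _ => aplanarB_id a), List.map_id']
    simp
  · simp only
    exact (List.map_congr_left (fun i _ => (aplanarB_id _).symm))
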